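-- pv_equiv track=rewrite | github.com/JiedaokouWangguan/SmarterQQ | utils.py | hash2
-- ===== SOURCE A (Python) =====
-- def hash2(uin, ptvfwebqq):
--     ptb = [0,0,0,0]
--     for i in range(0, len(ptvfwebqq)):
--         ptbIndex = i%4
--         ptb[ptbIndex] ^= ord(ptvfwebqq[i])
--
--     salt = ["EC", "OK"]
--     uinByte = [0,0,0,0]
--     uinByte[0] = (((uin >> 24) & 0xFF) ^ ord(salt[0][0]))
--     uinByte[1] = (((uin >> 16) & 0xFF) ^ ord(salt[0][1]))
--     uinByte[2] = (((uin >> 8) & 0xFF) ^ ord(salt[1][0]))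
--     uinByte[3] = ((uin & 0xFF) ^ ord(salt[1][1]))
--     result = [0,0,0,0,0,0,0,0]
--     for i in range(0,8):
--         if i % 2 == 0:
--             result[i] = ptb[i>>1]
--         else:
--             result[i] = uinByte[i>>1]
--     return byte2hex(result)
--
-- def byte2hex(bytes):
--     hex = hex = ['0', '1', '2', '3', '4', '5', '6', '7', '8', '9', 'A', 'B', 'C', 'D', 'E', 'F']
--     buf = ""
--     for i in range(0, len(bytes)):
--         buf += hex[(bytes[i] >> 4) & 0xF]
--         buf += hex[bytes[i] & 0xF]
--     return buf
-- ===== SOURCE B (Python) =====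
-- def _xor_ords(chars):
--     acc = 0
--     for ch in chars:
--         acc ^= ord(ch)
--     return acc
--
-- def hash2(uin, ptvfwebqq):
--     ptb = [_xor_ords(ptvfwebqq[j::4]) for j in range(4)]
--     uinByte = [((uin >> shift) & 0xFF) ^ ord(k)
--                for shift, k in zip((24, 16, 8, 0), "ECOK")]
--     return "".join("%02X" % b for p, u in zip(ptb, uinByte) for b in (p, u))
-- ===== Notes on version B (the rewrite author's own statement) =====
-- stated objective: alternative
-- what changed: The single interleaved i%4 pass with a mutable 4-slot array is replaced by four independent XOR folds over the strided slices s[j::4], the even/odd result-index loop by a zip interleave of ptb with uinByte, and the hex lookup-table loop by per-byte %02X formatting.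
import Mathlib
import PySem

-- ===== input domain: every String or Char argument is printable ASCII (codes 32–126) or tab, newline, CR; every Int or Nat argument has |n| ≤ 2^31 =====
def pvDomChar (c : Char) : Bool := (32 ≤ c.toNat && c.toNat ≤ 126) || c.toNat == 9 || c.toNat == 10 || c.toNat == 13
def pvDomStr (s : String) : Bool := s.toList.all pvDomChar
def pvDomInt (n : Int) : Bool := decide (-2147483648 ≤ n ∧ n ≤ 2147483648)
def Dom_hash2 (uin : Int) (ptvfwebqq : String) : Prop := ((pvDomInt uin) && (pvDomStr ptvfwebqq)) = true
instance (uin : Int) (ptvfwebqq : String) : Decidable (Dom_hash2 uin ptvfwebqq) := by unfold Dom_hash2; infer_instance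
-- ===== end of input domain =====

-- B replaces A's single interleaved i%4 pass and even/odd result loop by four independent
-- strided folds, a zip interleave, and per-byte "%02X" formatting (objective: alternative decomposition).

-- ===== PORT A =====
def pvHexTable : List Char :=
  ['0', '1', '2', '3', '4', '5', '6', '7', '8', '9', 'A', 'B', 'C', 'D', 'E', 'F']

def byte2hex (bytes : List Int) : String :=
  String.mk ((PySem.List.pyRange 0 (PySem.List.len bytes)).foldl (fun buf i =>
    buf ++ [PySem.List.pyGetD pvHexTable (PySem.Int.band (PySem.List.pyGetD bytes i 0 >>> (4 : Nat)) 0xF) '0']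
        ++ [PySem.List.pyGetD pvHexTable (PySem.Int.band (PySem.List.pyGetD bytes i 0) 0xF) '0']) [])

def hash2 (uin : Int) (ptvfwebqq : String) : String :=
  let cs := ptvfwebqq.toList
  let ptb : List Int := [0, 0, 0, 0]
  let ptb := (PySem.List.pyRange 0 (PySem.List.len cs)).foldl (fun ptb i =>
      let ptbIndex := PySem.Int.mod i 4
      PySem.List.pySetD ptb ptbIndex
        (PySem.Int.bxor (PySem.List.pyGetD ptb ptbIndex 0)
          ((PySem.List.pyGetD cs i ' ').toNat : Int))) ptb
  let salt : List String := ["EC", "OK"]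
  let uinByte : List Int := [0, 0, 0, 0]
  let uinByte := PySem.List.pySetD uinByte 0 (PySem.Int.bxor (PySem.Int.band (uin >>> (24 : Int)) 0xFF)
      (((PySem.List.pyGetD (PySem.List.pyGetD salt 0 "").toList 0 ' ').toNat : Int)))
  let uinByte := PySem.List.pySetD uinByte 1 (PySem.Int.bxor (PySem.Int.band (uin >>> (16 : Int)) 0xFF)
      (((PySem.List.pyGetD (PySem.List.pyGetD salt 0 "").toList 1 ' ').toNat : Int)))
  let uinByte := PySem.List.pySetD uinByte 2 (PySem.Int.bxor (PySem.Int.band (uin >>> (8 : Int)) 0xFF)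
      (((PySem.List.pyGetD (PySem.List.pyGetD salt 1 "").toList 0 ' ').toNat : Int)))
  let uinByte := PySem.List.pySetD uinByte 3 (PySem.Int.bxor (PySem.Int.band uin 0xFF)
      (((PySem.List.pyGetD (PySem.List.pyGetD salt 1 "").toList 1 ' ').toNat : Int)))
  let result : List Int := [0, 0, 0, 0, 0, 0, 0, 0]
  let result := (PySem.List.pyRange 0 8).foldl (fun result i =>
      if PySem.Int.mod i 2 = 0 then
        PySem.List.pySetD result i (PySem.List.pyGetD ptb (i >>> (1 : Nat)) 0)
      else
        PySem.List.pySetD result i (PySem.List.pyGetD uinByte (i >>> (1 : Nat)) 0)) result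
  byte2hex result

-- ===== PORT B =====
def xorOrds (cs : List Char) : Int :=
  cs.foldl (fun acc ch => PySem.Int.bxor acc ((ch.toNat : Int))) 0

-- hand port of the slice s[j::4] for j ≥ 0 as cs.drop j fed to every4; every4 is exact for
-- a step-4 extended slice starting at the head of the remaining list
def every4 : List Char → List Char
  | [] => []
  | c :: cs => c :: every4 (cs.drop 3)
termination_by cs => cs.length
decreasing_by simp

-- hand port of one hex digit of "%02X" (exact for 0 ≤ d < 16, the only values produced)
def hexDigit (d : Int) : Char :=
  if d < 10 then Char.ofNat (48 + d.toNat) else Char.ofNat (55 + d.toNat)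

-- hand port of "%02X" % b (exact for 0 ≤ b, the only values produced)
def hexByte (b : Int) : List Char :=
  [hexDigit (PySem.Int.band (b >>> (4 : Nat)) 0xF), hexDigit (PySem.Int.band b 0xF)]

def hash2_alt (uin : Int) (ptvfwebqq : String) : String :=
  let cs := ptvfwebqq.toList
  let ptb := (List.range 4).map (fun j => xorOrds (every4 (cs.drop j)))
  let uinByte := ([(24, 'E'), (16, 'C'), (8, 'O'), (0, 'K')] : List (Int × Char)).map
      (fun sk => PySem.Int.bxor (PySem.Int.band (uin >>> sk.1) 0xFF) ((sk.2.toNat : Int)))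
  String.mk (((ptb.zip uinByte).map (fun pu => hexByte pu.1 ++ hexByte pu.2)).flatten)

-- ===== PRECONDITION & SPEC =====
def Spec_hash2 (uin : Int) (ptvfwebqq : String) (out : String) : Prop := out = hash2_alt uin ptvfwebqq
instance (uin : Int) (ptvfwebqq : String) (out : String) : Decidable (Spec_hash2 uin ptvfwebqq out) := by unfold Spec_hash2; infer_instance

-- ===== CLAIM (what is proved, stated in full; the proofs are below) =====
def Claim_equal_hash2 : Prop := ∀ (uin : Int) (ptvfwebqq : String), Dom_hash2 uin ptvfwebqq → Spec_hash2 uin ptvfwebqq (hash2 uin ptvfwebqq)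

-- ===== LEMMAS AND PROOFS =====

-- Nat-level xor fold
def nXor (cs : List Char) (a : Nat) : Nat := cs.foldl (fun n c => n ^^^ c.toNat) a

theorem foldl_bxor_eq_nXor (cs : List Char) (a : Nat) :
    cs.foldl (fun acc ch => PySem.Int.bxor acc ((ch.toNat : Int))) (a : Int) = (nXor cs a : Int) := by
  induction cs generalizing a with
  | nil => rfl
  | cons c cs ih => simp [nXor, List.foldl, PySem.Int.bxor_natCast] at *; exact ih _

theorem xorOrds_eq (cs : List Char) : xorOrds cs = (nXor cs 0 : Int) := by
  simpa using foldl_bxor_eq_nXor cs 0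

-- the subsequence of cs at absolute positions p (cs starting at absolute index i) with p % 4 = j
def grab (j : Nat) : List Char → Nat → List Char
  | [], _ => []
  | c :: cs, i => if i % 4 = j then c :: grab j cs (i + 1) else grab j cs (i + 1)

theorem grab_eq_every4 (cs : List Char) : ∀ (i j : Nat), j < 4 →
    grab j cs i = every4 (cs.drop ((4 + j - i % 4) % 4)) := by
  induction cs with
  | nil => intro i j hj; simp [grab, every4]
  | cons c cs ih =>
    intro i j hj
    by_cases h : i % 4 = j
    · have hd : (4 + j - i % 4) % 4 = 0 := by omega
      have h3 : (4 + j - (i + 1) % 4) % 4 = 3 := by omega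
      rw [hd, List.drop_zero, every4, grab]
      simp only [h]
      rw [ih (i + 1) j hj, h3]
      simp
    · obtain ⟨e, he⟩ : ∃ e, (4 + j - i % 4) % 4 = e + 1 := ⟨(4 + j - i % 4) % 4 - 1, by omega⟩
      have h3 : (4 + j - (i + 1) % 4) % 4 = e := by omega
      rw [grab]
      simp only [h, if_false]
      rw [ih (i + 1) j hj, h3, he, List.drop_succ_cons]

-- characterization of A's interleaved accumulation loop
theorem loopA_eq (cs : List Char) : ∀ (tail : List Char) (k : Nat) (a0 a1 a2 a3 : Nat),
    cs.drop k = tail →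
    (PySem.List.pyRange k (PySem.List.len cs)).foldl (fun ptb i =>
      PySem.List.pySetD ptb (PySem.Int.mod i 4)
        (PySem.Int.bxor (PySem.List.pyGetD ptb (PySem.Int.mod i 4) 0)
          ((PySem.List.pyGetD cs i ' ').toNat : Int))) [(a0 : Int), (a1 : Int), (a2 : Int), (a3 : Int)]
    = [(nXor (grab 0 tail k) a0 : Int), (nXor (grab 1 tail k) a1 : Int),
       (nXor (grab 2 tail k) a2 : Int), (nXor (grab 3 tail k) a3 : Int)] := by
  intro tail
  induction tail with
  | nil =>
    intro k a0 a1 a2 a3 hk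
    have hlen : cs.length ≤ k := by
      have := congrArg List.length hk; simp at this; omega
    have hr : PySem.List.pyRange (k : Int) (PySem.List.len cs) = [] := by
      simp [PySem.List.pyRange, PySem.List.len]; omega
    rw [hr]
    simp [grab, nXor]
  | cons c rest ih =>
    intro k a0 a1 a2 a3 hk
    have hklt : k < cs.length := by
      have := congrArg List.length hk; simp at this; omega
    have hget : cs[k]? = some c := by rw [← List.head?_drop, hk]; rfl
    have hgetE : cs.getD k ' ' = c := by simp [List.getD, hget]
    have hdrop : cs.drop (k + 1) = rest := by
      have := congrArg List.tail hk
      simpa [List.tail_drop] using this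
    have hcons : PySem.List.pyRange (k : Int) (PySem.List.len cs) =
        (k : Int) :: PySem.List.pyRange ((k + 1 : Nat) : Int) (PySem.List.len cs) := by
      rw [PySem.List.pyRange_one_cons (by simp [PySem.List.len]; omega)]
      norm_num
    rw [hcons, List.foldl_cons]
    rw [show PySem.Int.mod (k : Int) 4 = ((k % 4 : Nat) : Int) from PySem.Int.mod_natCast k 4]
    rw [PySem.List.pySetD_natCast, PySem.List.pyGetD_natCast, PySem.List.pyGetD_natCast, hgetE]
    have h4 : k % 4 = 0 ∨ k % 4 = 1 ∨ k % 4 = 2 ∨ k % 4 = 3 := by omega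
    rcases h4 with h | h | h | h <;>
      rw [h] <;>
      simp only [List.getD, List.set, List.getElem?_cons_zero, List.getElem?_cons_succ,
        Option.getD_some] <;>
      rw [show ∀ a b : Nat, PySem.Int.bxor (a : Int) (b : Int) = ((a ^^^ b : Nat) : Int) from
        fun a b => PySem.Int.bxor_natCast a b] <;>
      rw [ih (k + 1) _ _ _ _ hdrop] <;>
      simp [grab, h, nXor]

-- hex table lookup = computed hex digit, for in-range digits
theorem table_eq_hexDigit (d : Nat) (hd : d < 16) :
    PySem.List.pyGetD pvHexTable (d : Int) '0' = hexDigit (d : Int) := by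
  interval_cases d <;> rfl

theorem digit_lookup (n : Nat) :
    PySem.List.pyGetD pvHexTable (PySem.Int.band 15 (n : Int)) '0'
      = hexDigit (PySem.Int.band 15 (n : Int)) := by
  have h : PySem.Int.band 15 (n : Int) = ((15 &&& n : Nat) : Int) := by
    have := PySem.Int.band_natCast 15 n; simpa using this
  rw [h]
  exact table_eq_hexDigit _ (by have := Nat.and_le_left (n := 15) (m := n); omega)

-- the back half of both programs on arbitrary byte values that are casts of naturals
set_option maxHeartbeats 2000000 in
theorem back_half (p0 p1 p2 p3 u0 u1 u2 u3 : Nat) :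
    byte2hex ((PySem.List.pyRange 0 8).foldl (fun result i =>
      if PySem.Int.mod i 2 = 0 then
        PySem.List.pySetD result i (PySem.List.pyGetD [(p0 : Int), (p1 : Int), (p2 : Int), (p3 : Int)] (i >>> (1 : Nat)) 0)
      else
        PySem.List.pySetD result i (PySem.List.pyGetD [(u0 : Int), (u1 : Int), (u2 : Int), (u3 : Int)] (i >>> (1 : Nat)) 0))
      [0, 0, 0, 0, 0, 0, 0, 0])
    = String.mk (((([(p0 : Int), (p1 : Int), (p2 : Int), (p3 : Int)].zip
        [(u0 : Int), (u1 : Int), (u2 : Int), (u3 : Int)]).map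
        (fun pu => hexByte pu.1 ++ hexByte pu.2)).flatten)) := by
  have hres : ((PySem.List.pyRange 0 8).foldl (fun result i =>
      if PySem.Int.mod i 2 = 0 then
        PySem.List.pySetD result i (PySem.List.pyGetD [(p0 : Int), (p1 : Int), (p2 : Int), (p3 : Int)] (i >>> (1 : Nat)) 0)
      else
        PySem.List.pySetD result i (PySem.List.pyGetD [(u0 : Int), (u1 : Int), (u2 : Int), (u3 : Int)] (i >>> (1 : Nat)) 0))
      [0, 0, 0, 0, 0, 0, 0, 0] : List Int)
      = [(p0 : Int), u0, p1, u1, p2, u2, p3, u3] := by rfl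
  rw [hres]
  have hr8 : PySem.List.pyRange 0 (PySem.List.len ([(p0 : Int), u0, p1, u1, p2, u2, p3, u3])) = [0, 1, 2, 3, 4, 5, 6, 7] := by
    simp [PySem.List.len]; rfl
  rw [byte2hex, hr8]
  simp only [List.foldl_cons, List.foldl_nil, List.nil_append, List.append_assoc, pysem]
  simp only [List.getD_cons_zero, List.getD_cons_succ]
  simp only [show ∀ n : Nat, ((n : Int) >>> (4 : Nat)) = ((n >>> 4 : Nat) : Int) from
    fun n => (Int.natCast_shiftRight n 4).symm]
  simp only [digit_lookup]
  simp only [List.zip, List.zipWith, List.map, List.flatten, hexByte]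
  simp only [show ∀ n : Nat, ((n : Int) >>> (4 : Nat)) = ((n >>> 4 : Nat) : Int) from
    fun n => (Int.natCast_shiftRight n 4).symm]
  simp only [show ∀ x : Int, PySem.Int.band x 0xF = PySem.Int.band 0xF x from
    fun x => PySem.Int.band_comm x 0xF]
  simp

-- A's uinByte construction, computed out
theorem uinByte_chain (uin : Int) :
    PySem.List.pySetD (PySem.List.pySetD (PySem.List.pySetD (PySem.List.pySetD
      ([0, 0, 0, 0] : List Int)
      0 (PySem.Int.bxor (PySem.Int.band (uin >>> (24 : Int)) 0xFF)
        (((PySem.List.pyGetD (PySem.List.pyGetD (["EC", "OK"] : List String) 0 "").toList 0 ' ').toNat : Int))))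
      1 (PySem.Int.bxor (PySem.Int.band (uin >>> (16 : Int)) 0xFF)
        (((PySem.List.pyGetD (PySem.List.pyGetD (["EC", "OK"] : List String) 0 "").toList 1 ' ').toNat : Int))))
      2 (PySem.Int.bxor (PySem.Int.band (uin >>> (8 : Int)) 0xFF)
        (((PySem.List.pyGetD (PySem.List.pyGetD (["EC", "OK"] : List String) 1 "").toList 0 ' ').toNat : Int))))
      3 (PySem.Int.bxor (PySem.Int.band uin 0xFF)
        (((PySem.List.pyGetD (PySem.List.pyGetD (["EC", "OK"] : List String) 1 "").toList 1 ' ').toNat : Int)))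
    = [PySem.Int.bxor (PySem.Int.band (uin >>> (24 : Int)) 0xFF) 69,
       PySem.Int.bxor (PySem.Int.band (uin >>> (16 : Int)) 0xFF) 67,
       PySem.Int.bxor (PySem.Int.band (uin >>> (8 : Int)) 0xFF) 79,
       PySem.Int.bxor (PySem.Int.band uin 0xFF) 75] := by rfl

-- ===== VERDICT (by name: the statement is the Claim_ definition above) =====
theorem hash2_spec : Claim_equal_hash2 := by
  intro uin s _
  unfold Spec_hash2
  simp only [hash2, hash2_alt]
  have hA := loopA_eq s.toList s.toList 0 0 0 0 0 rfl
  simp only [Nat.cast_zero] at hA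
  have g0 : grab 0 s.toList 0 = every4 (s.toList.drop 0) := by
    have := grab_eq_every4 s.toList 0 0 (by norm_num); simpa using this
  have g1 : grab 1 s.toList 0 = every4 (s.toList.drop 1) := by
    have := grab_eq_every4 s.toList 0 1 (by norm_num); simpa using this
  have g2 : grab 2 s.toList 0 = every4 (s.toList.drop 2) := by
    have := grab_eq_every4 s.toList 0 2 (by norm_num); simpa using this
  have g3 : grab 3 s.toList 0 = every4 (s.toList.drop 3) := by
    have := grab_eq_every4 s.toList 0 3 (by norm_num); simpa using this
  rw [g0, g1, g2, g3] at hA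
  rw [hA, uinByte_chain]
  simp only [show List.range 4 = [0, 1, 2, 3] from rfl, List.map, xorOrds_eq]
  simp only [show ∀ x : Int, x >>> (0 : Int) = x from fun x => by
    rw [show (0 : Int) = ((0 : Nat) : Int) from rfl,
      show ((0 : Nat) : Int) = -((0 : Nat) : Int) from by norm_num, Int.shiftRight_neg,
      Int.shiftLeft_eq_mul_pow]; simp]
  simp only [show (('E'.toNat : Nat) : Int) = 69 from rfl,
    show (('C'.toNat : Nat) : Int) = 67 from rfl,
    show (('O'.toNat : Nat) : Int) = 79 from rfl,
    show (('K'.toNat : Nat) : Int) = 75 from rfl]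
  have hnn : ∀ (x v : Int), 0 ≤ v → 0 ≤ PySem.Int.bxor (PySem.Int.band x 0xFF) v := by
    intro x v hv
    have hb : (0 : Int) ≤ PySem.Int.band x 0xFF := by
      rw [PySem.Int.band_comm]
      exact PySem.Int.band_nonneg_of_nonneg_left _ (by norm_num)
    rw [PySem.Int.bxor_of_nonneg hb hv]
    exact Int.natCast_nonneg _
  obtain ⟨u0, hu0⟩ : ∃ n : Nat, PySem.Int.bxor (PySem.Int.band (uin >>> (24 : Int)) 0xFF) 69 = (n : Int) :=
    ⟨_, (Int.toNat_of_nonneg (hnn _ _ (by norm_num))).symm⟩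
  obtain ⟨u1, hu1⟩ : ∃ n : Nat, PySem.Int.bxor (PySem.Int.band (uin >>> (16 : Int)) 0xFF) 67 = (n : Int) :=
    ⟨_, (Int.toNat_of_nonneg (hnn _ _ (by norm_num))).symm⟩
  obtain ⟨u2, hu2⟩ : ∃ n : Nat, PySem.Int.bxor (PySem.Int.band (uin >>> (8 : Int)) 0xFF) 79 = (n : Int) :=
    ⟨_, (Int.toNat_of_nonneg (hnn _ _ (by norm_num))).symm⟩
  obtain ⟨u3, hu3⟩ : ∃ n : Nat, PySem.Int.bxor (PySem.Int.band uin 0xFF) 75 = (n : Int) :=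
    ⟨_, (Int.toNat_of_nonneg (hnn _ _ (by norm_num))).symm⟩
  rw [hu0, hu1, hu2, hu3]
  exact back_half _ _ _ _ _ _ _ _
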